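-- pv_equiv track=rewrite | github.com/pypi-data/pypi-mirror-400 | packages/rosettes/rosettes-0.1.0.tar.gz/rosettes-0.1.0/src/rosettes/_parallel.py | _find_safe_splits
-- ===== SOURCE A (Python) =====
-- def _find_safe_splits(code: str, target_chunk_size: int) -> list[int]:
--     """Find safe split points (newlines) for parallel tokenization.
--
--     We split at newlines to avoid splitting in the middle of tokens.
--     This is a heuristic that works for most languages.
--
--     Args:
--         code: Source code to split.
--         target_chunk_size: Target size for each chunk.
--
--     Returns:
--         List of positions to split at.
--     """
--     splits: list[int] = []
--     pos = target_chunk_size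
--
--     while pos < len(code):
--         # Find nearest newline before or at target
--         newline_pos = code.rfind("\n", max(0, pos - target_chunk_size // 2), pos)
--
--         if newline_pos == -1:
--             # No newline found before target, look after
--             newline_pos = code.find("\n", pos)
--             if newline_pos == -1:
--                 break
--
--         split_pos = newline_pos + 1  # Split after newline
--
--         if split_pos > (splits[-1] if splits else 0):
--             splits.append(split_pos)
--
--         pos = split_pos + target_chunk_size
--
--     return splits
-- ===== SOURCE B (Python) =====
-- def _find_safe_splits(code: str, target_chunk_size: int) -> list[int]:
--     """Two-pointer single pass: index all newline positions once, then walk that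
--     index with a monotone cursor j (pos only increases), never rescanning the
--     text; `last` tracks the previous split instead of peeking splits[-1]."""
--     newlines = [i for i, ch in enumerate(code) if ch == "\n"]
--     m = len(newlines)
--     n = len(code)
--     splits: list[int] = []
--     last = 0
--     pos = target_chunk_size
--     j = 0  # cursor: first index with newlines[j] >= pos, advanced monotonically
--
--     while pos < n:
--         while j < m and newlines[j] < pos:
--             j += 1
--         lo = max(0, pos - target_chunk_size // 2)
--         if j > 0 and newlines[j - 1] >= lo:
--             nl = newlines[j - 1]   # highest newline in [lo, pos)
--         elif j < m:
--             nl = newlines[j]       # lowest newline at or after pos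
--         else:
--             break
--         sp = nl + 1
--         if sp > last:
--             splits.append(sp)
--             last = sp
--         pos = sp + target_chunk_size
--
--     return splits
-- ===== Notes on version B (the rewrite author's own statement) =====
-- stated objective: alternative
-- what changed: B builds the sorted list of newline positions in one pass and then resolves every chunk boundary with a monotone two-pointer cursor over that index (plus a 'last' accumulator replacing the splits[-1] peek), instead of A's per-iteration backward/forward substring scans with rfind/find.
import Mathlib
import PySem

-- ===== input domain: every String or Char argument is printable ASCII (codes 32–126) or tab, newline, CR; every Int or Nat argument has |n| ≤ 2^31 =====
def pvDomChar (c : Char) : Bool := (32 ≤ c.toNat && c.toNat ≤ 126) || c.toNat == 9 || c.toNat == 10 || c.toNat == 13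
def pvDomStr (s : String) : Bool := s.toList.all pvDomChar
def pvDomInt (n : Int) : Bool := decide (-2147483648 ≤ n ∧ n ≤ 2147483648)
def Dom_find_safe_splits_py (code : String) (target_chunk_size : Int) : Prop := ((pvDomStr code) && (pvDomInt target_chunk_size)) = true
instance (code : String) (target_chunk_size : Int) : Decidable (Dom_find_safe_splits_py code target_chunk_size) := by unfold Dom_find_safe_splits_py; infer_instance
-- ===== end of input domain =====

-- B replaces A's per-iteration rfind/find string scans by a one-pass newline index walked
-- with a monotone two-pointer cursor, and a `last` accumulator instead of peeking splits[-1];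
-- same return value (alternative algorithm, not claimed faster).


-- ===== PORT A =====
-- while-loop of A as fuel recursion (fuel code.length+1 suffices for target_chunk_size ≥ 0,
-- where pos strictly increases each iteration); state = (pos, splits), exactly A's.
def pvLoopA (s : List Char) (ts : Int) : Nat → Int → List Int → List Int
  | 0, _, splits => splits
  | fuel+1, pos, splits =>
    if pos < (s.length : Int) then
      -- newline_pos = code.rfind("\n", max(0, pos - ts//2), pos), then the find fallback
      let np1 := PySem.Chars.rfindFrom s ['\n'] (max 0 (pos - PySem.Int.floordiv ts 2)) (some pos)
      let nl? : Option Int :=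
        if np1 = -1 then
          let np2 := PySem.Chars.findFrom s ['\n'] pos none
          if np2 = -1 then none else some np2
        else some np1
      match nl? with
      | none => splits                             -- break
      | some nl =>
        let split_pos := nl + 1
        let splits' := if (splits.getLast?.getD 0) < split_pos then splits ++ [split_pos] else splits
        pvLoopA s ts fuel (split_pos + ts) splits'
    else splits

def find_safe_splits_py (code : String) (target_chunk_size : Int) : List Int :=
  pvLoopA code.toList target_chunk_size (code.toList.length + 1) target_chunk_size []

-- ===== PORT B =====
-- sorted list of all newline positions (B's enumerate comprehension)
def pvNewlines (s : List Char) : List Int :=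
  ((PySem.List.enumerate s).filter (fun p => p.2 == '\n')).map (fun p => p.1)

-- B's inner 'while j < m and newlines[j] < pos: j += 1'
def pvAdvance (nls : List Int) (pos : Int) : Nat → Nat
  | j =>
    if h : j < nls.length then
      if nls[j] < pos then pvAdvance nls pos (j+1) else j
    else j
  termination_by j => nls.length - j

-- B's outer loop; state = (pos, cursor j, last, splits)
def pvLoopB (nls : List Int) (n ts : Int) : Nat → Int → Nat → Int → List Int → List Int
  | 0, _, _, _, splits => splits
  | fuel+1, pos, j, last, splits =>
    if pos < n then
      let j' := pvAdvance nls pos j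
      let lo := max 0 (pos - PySem.Int.floordiv ts 2)
      let nl? : Option Int :=
        if 0 < j' ∧ lo ≤ nls.getD (j'-1) 0 then some (nls.getD (j'-1) 0)
        else if j' < nls.length then some (nls.getD j' 0)
        else none
      match nl? with
      | none => splits                             -- break
      | some nl =>
        let sp := nl + 1
        if last < sp then pvLoopB nls n ts fuel (sp + ts) j' sp (splits ++ [sp])
        else pvLoopB nls n ts fuel (sp + ts) j' last splits
    else splits

def find_safe_splits_py_alt (code : String) (target_chunk_size : Int) : List Int :=
  pvLoopB (pvNewlines code.toList) (code.toList.length : Int) target_chunk_size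
    (code.toList.length + 1) target_chunk_size 0 0 []

-- ===== PRECONDITION & SPEC =====
-- Pre_ excludes only negative target_chunk_size on strings containing a newline: there
-- A's while loop never returns (each iteration finds a newline again and pos stops advancing).
def Pre_find_safe_splits_py (code : String) (target_chunk_size : Int) : Prop :=
  0 ≤ target_chunk_size ∨ '\n' ∉ code.toList
instance (code : String) (target_chunk_size : Int) : Decidable (Pre_find_safe_splits_py code target_chunk_size) := by unfold Pre_find_safe_splits_py; infer_instance

def pvWitness_find_safe_splits_py : String × Int := ("ab\ncd\nef\ng", 3)

def Spec_find_safe_splits_py (code : String) (target_chunk_size : Int) (out : List Int) : Prop := out = find_safe_splits_py_alt code target_chunk_size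
instance (code : String) (target_chunk_size : Int) (out : List Int) : Decidable (Spec_find_safe_splits_py code target_chunk_size out) := by unfold Spec_find_safe_splits_py; infer_instance

-- ===== CLAIM (what is proved, stated in full; the proofs are below) =====
def Claim_equal_find_safe_splits_py : Prop := ∀ (code : String) (target_chunk_size : Int), Dom_find_safe_splits_py code target_chunk_size → Pre_find_safe_splits_py code target_chunk_size → Spec_find_safe_splits_py code target_chunk_size (find_safe_splits_py code target_chunk_size)

-- ===== LEMMAS AND PROOFS =====

theorem pv_mem_newlines (s : List Char) (i : Int) :
    i ∈ pvNewlines s ↔ 0 ≤ i ∧ i < (s.length : Int) ∧ s[i.toNat]? = some '\n' := by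
  unfold pvNewlines
  simp only [List.mem_map, List.mem_filter, PySem.List.mem_enumerate_iff]
  constructor
  · rintro ⟨⟨a, c⟩, ⟨⟨k, hk, hpq⟩, hc⟩, rfl⟩
    simp only [Prod.mk.injEq, zero_add] at hpq hc
    obtain ⟨ha, hc2⟩ := hpq
    subst ha; subst hc2
    refine ⟨by omega, by omega, ?_⟩
    rw [List.getElem?_eq_getElem (by simpa using hk)]
    simpa using hc
  · rintro ⟨h0, hlt, hget⟩
    have hkn : i.toNat < s.length := by omega
    refine ⟨(i, '\n'), ⟨⟨i.toNat, hkn, ?_⟩, by simp⟩, rfl⟩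
    rw [List.getElem?_eq_getElem hkn] at hget
    simp only [zero_add, Prod.mk.injEq]
    exact ⟨by omega, (Option.some.inj hget).symm⟩

theorem pv_newlines_sorted (s : List Char) : (pvNewlines s).Pairwise (· ≤ ·) := by
  unfold pvNewlines
  rw [List.pairwise_map]
  have h1 := PySem.List.pairwise_lt_enumerate s 0
  have h2 := List.Pairwise.sublist (List.filter_sublist (p := fun p => p.2 == '\n')) h1
  exact h2.imp (fun h => le_of_lt h)

theorem pv_singleton_prefix (l : List Char) (j : Nat) :
    ['\n'] <+: l.drop j ↔ l[j]? = some '\n' := by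
  rw [← List.head?_drop]
  cases h : l.drop j with
  | nil => simp
  | cons a t => constructor
                · rintro ⟨r, hr⟩; simp at hr; simp [hr.1.symm]
                · intro hh; simp at hh; exact ⟨t, by simp [hh]⟩

theorem pv_rfind_go_spec (l sub : List Char) (k : Nat) :
    (PySem.Chars.rfind.go l sub k = -1 ∧ ∀ j ≤ k, ¬ sub <+: l.drop j) ∨
    (∃ j ≤ k, PySem.Chars.rfind.go l sub k = (j : Int) ∧ sub <+: l.drop j ∧
      ∀ i, j < i → i ≤ k → ¬ sub <+: l.drop i) := by
  induction k with
  | zero =>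
    by_cases h : sub <+: l
    · right
      exact ⟨0, le_refl _, by simp [PySem.Chars.rfind.go, List.isPrefixOf_iff_prefix, h],
             by simpa using h, fun i hi hi2 => by omega⟩
    · left
      constructor
      · simp [PySem.Chars.rfind.go, List.isPrefixOf_iff_prefix, h]
      · intro j hj; interval_cases j; simpa using h
  | succ j ih =>
    by_cases h : sub <+: l.drop (j+1)
    · right
      refine ⟨j+1, le_refl _, ?_, h, fun i hi hi2 => by omega⟩
      simp [PySem.Chars.rfind.go, List.isPrefixOf_iff_prefix, h]
    · have hgo : PySem.Chars.rfind.go l sub (j+1) = PySem.Chars.rfind.go l sub j := by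
        simp [PySem.Chars.rfind.go, List.isPrefixOf_iff_prefix, h]
      rcases ih with ⟨h1, h2⟩ | ⟨m, hm, heq, hp, hmax⟩
      · left
        refine ⟨hgo ▸ h1, fun i hi => ?_⟩
        rcases Nat.lt_or_ge i (j+1) with hi2 | hi2
        · exact h2 i (by omega)
        · have : i = j+1 := by omega
          subst this; exact h
      · right
        refine ⟨m, by omega, hgo ▸ heq, hp, fun i hi hi2 => ?_⟩
        rcases Nat.lt_or_ge i (j+1) with hi3 | hi3
        · exact hmax i hi (by omega)
        · have : i = j+1 := by omega
          subst this; exact h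

theorem pv_nneg_mem (s : List Char) (i : Int) (h : i ∈ pvNewlines s) : 0 ≤ i :=
  ((pv_mem_newlines s i).mp h).1

theorem pv_rfindFrom_char (s : List Char) (lo pos : Int) (h0 : 0 ≤ lo) (hlp : lo ≤ pos)
    (hpn : pos ≤ (s.length : Int)) :
    (PySem.Chars.rfindFrom s ['\n'] lo (some pos) = -1 ∧
       ∀ i ∈ pvNewlines s, ¬ (lo ≤ i ∧ i < pos)) ∨
    (PySem.Chars.rfindFrom s ['\n'] lo (some pos) ∈ pvNewlines s ∧
       lo ≤ PySem.Chars.rfindFrom s ['\n'] lo (some pos) ∧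
       PySem.Chars.rfindFrom s ['\n'] lo (some pos) < pos ∧
       ∀ i ∈ pvNewlines s, lo ≤ i → i < pos → i ≤ PySem.Chars.rfindFrom s ['\n'] lo (some pos)) := by
  have hE : PySem.Chars.rfindFrom s ['\n'] lo (some pos)
      = (let seg := List.drop lo.toNat (List.take pos.toNat s)
         let r := PySem.Chars.rfind seg ['\n']
         if r = -1 then -1 else lo + r) := by
    unfold PySem.Chars.rfindFrom
    have h1 : ¬ ((s.length : Int) < pos) := by omega
    have h2 : ¬ (pos < 0) := by omega
    have h3 : ¬ (lo < 0) := by omega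
    have h4 : ¬ (pos < lo) := by omega
    simp only [h1, h2, h3, h4, if_false, if_neg]
  set seg := List.drop lo.toNat (List.take pos.toNat s) with hseg
  have hseglen : seg.length = pos.toNat - lo.toNat := by
    simp [hseg]; omega
  -- occurrence translation
  have hP : ∀ j : Nat, (['\n'] <+: seg.drop j ↔ (lo + (j:Int) < pos ∧ s[(lo.toNat + j)]? = some '\n')) := by
    intro j
    rw [pv_singleton_prefix]
    have : seg[j]? = (List.take pos.toNat s)[lo.toNat + j]? := by
      simp [hseg, List.getElem?_drop]
    rw [this, List.getElem?_take]
    constructor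
    · intro h; split at h
      · exact ⟨by omega, h⟩
      · simp at h
    · rintro ⟨h1, h2⟩; rw [if_pos (by omega)]; exact h2
  have hrfind : PySem.Chars.rfind seg ['\n'] = PySem.Chars.rfind.go seg ['\n'] seg.length := rfl
  rcases pv_rfind_go_spec seg ['\n'] seg.length with ⟨hneg, hnone⟩ | ⟨m, hm, heq, hp, hmax⟩
  · left
    rw [hE]
    simp only [hrfind, hneg]
    refine ⟨by simp, ?_⟩
    · rintro i hi ⟨hi1, hi2⟩
      rw [pv_mem_newlines] at hi
      obtain ⟨hge, hlt, hget⟩ := hi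
      have hj : i.toNat - lo.toNat ≤ seg.length := by omega
      refine hnone _ hj ?_
      rw [hP]
      constructor
      · omega
      · have : lo.toNat + (i.toNat - lo.toNat) = i.toNat := by omega
        rw [this]; exact hget
  · right
    have hPm := (hP m).mp hp
    rw [hE]
    simp only [hrfind, heq]
    rw [if_neg (by omega)]
    refine ⟨?_, by omega, by omega, ?_⟩
    · rw [pv_mem_newlines]
      refine ⟨by omega, by omega, ?_⟩
      have : (lo + (m:Int)).toNat = lo.toNat + m := by omega
      rw [this]; exact hPm.2
    · intro i hi hi1 hi2
      rw [pv_mem_newlines] at hi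
      obtain ⟨hge, hlt, hget⟩ := hi
      by_contra hcon
      push_neg at hcon
      have hj : i.toNat - lo.toNat ≤ seg.length := by omega
      refine hmax (i.toNat - lo.toNat) (by omega) hj ?_
      rw [hP]
      refine ⟨by omega, ?_⟩
      have : lo.toNat + (i.toNat - lo.toNat) = i.toNat := by omega
      rw [this]; exact hget

theorem pv_findFrom_char (s : List Char) (pos : Int) (h0 : 0 ≤ pos)
    (hpn : pos ≤ (s.length : Int)) :
    (PySem.Chars.findFrom s ['\n'] pos none = -1 ∧ ∀ i ∈ pvNewlines s, ¬ pos ≤ i) ∨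
    (PySem.Chars.findFrom s ['\n'] pos none ∈ pvNewlines s ∧
       pos ≤ PySem.Chars.findFrom s ['\n'] pos none ∧
       ∀ i ∈ pvNewlines s, pos ≤ i → PySem.Chars.findFrom s ['\n'] pos none ≤ i) := by
  have hE : PySem.Chars.findFrom s ['\n'] pos none
      = (let seg := List.drop pos.toNat s
         let r := PySem.Chars.find seg ['\n']
         if r = -1 then -1 else pos + r) := by
    unfold PySem.Chars.findFrom
    have h3 : ¬ (pos < 0) := by omega
    have h4 : ¬ ((s.length : Int) < pos) := by omega
    simp only [h3, h4, if_false, Int.toNat_natCast, List.take_length]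
  set seg := List.drop pos.toNat s with hseg
  have hP : ∀ j : Nat, (['\n'] <+: seg.drop j ↔ s[(pos.toNat + j)]? = some '\n') := by
    intro j
    rw [pv_singleton_prefix]
    simp [hseg, List.getElem?_drop]
  by_cases hneg : PySem.Chars.find seg ['\n'] = -1
  · left
    rw [hE]; simp only [hneg]
    refine ⟨by simp, ?_⟩
    intro i hi hile
    rw [pv_mem_newlines] at hi
    obtain ⟨hge, hlt, hget⟩ := hi
    rw [PySem.Chars.find_eq_neg_one_iff] at hneg
    apply hneg
    rw [← PySem.Chars.isIn_iff_infix, ← PySem.Chars.exists_prefix_drop_iff_isIn]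
    refine ⟨i.toNat - pos.toNat, ?_⟩
    rw [hP]
    have : pos.toNat + (i.toNat - pos.toNat) = i.toNat := by omega
    rw [this]; exact hget
  · right
    have hge0 : 0 ≤ PySem.Chars.find seg ['\n'] := by
      have := PySem.Chars.neg_one_le_find (s := seg) (sub := ['\n'])
      omega
    obtain ⟨hpre, hmin⟩ := PySem.Chars.find_spec (s := seg) (sub := ['\n']) hge0
    set r := PySem.Chars.find seg ['\n'] with hr
    have hPr := (hP r.toNat).mp hpre
    have hlen : pos.toNat + r.toNat < s.length := by
      by_contra hc
      rw [List.getElem?_eq_none (by omega)] at hPr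
      simp at hPr
    rw [hE]
    simp only [hr] at hneg ⊢
    rw [if_neg hneg]
    refine ⟨?_, by omega, ?_⟩
    · rw [pv_mem_newlines]
      refine ⟨by omega, by omega, ?_⟩
      have : (pos + r).toNat = pos.toNat + r.toNat := by omega
      rw [this]; exact hPr
    · intro i hi hile
      rw [pv_mem_newlines] at hi
      obtain ⟨hge, hlt, hget⟩ := hi
      by_contra hcon
      push_neg at hcon
      refine hmin (i.toNat - pos.toNat) (by omega) ?_
      rw [hP]
      have : pos.toNat + (i.toNat - pos.toNat) = i.toNat := by omega
      rw [this]; exact hget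

theorem pv_newlines_nil (s : List Char) (hno : '\n' ∉ s) : pvNewlines s = [] := by
  rw [List.eq_nil_iff_forall_not_mem]
  intro i hi
  obtain ⟨_, _, hget⟩ := (pv_mem_newlines s i).mp hi
  exact hno (List.mem_of_getElem? hget)

theorem pv_no_newline_rfindFrom (s : List Char) (hno : '\n' ∉ s) (a b : Int) :
    PySem.Chars.rfindFrom s ['\n'] a (some b) = -1 := by
  have hseg : ∀ seg : List Char, seg.Sublist s → PySem.Chars.rfind seg ['\n'] = -1 := by
    intro seg hsub
    rcases pv_rfind_go_spec seg ['\n'] seg.length with ⟨h, _⟩ | ⟨j, _, _, hp, _⟩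
    · exact h
    · exfalso
      apply hno
      apply hsub.mem
      have : '\n' ∈ seg.drop j := hp.mem (by simp)
      exact List.mem_of_mem_drop this
  have key : ∀ (u v : Nat), PySem.Chars.rfind (List.drop u (List.take v s)) ['\n'] = -1 :=
    fun u v => hseg _ ((List.drop_sublist _ _).trans (List.take_sublist _ _))
  unfold PySem.Chars.rfindFrom
  simp only [key, if_pos rfl]
  split_ifs <;> rfl

theorem pv_no_newline_findFrom (s : List Char) (hno : '\n' ∉ s) (a : Int) :
    PySem.Chars.findFrom s ['\n'] a none = -1 := by
  have hseg : ∀ seg : List Char, seg.Sublist s → PySem.Chars.find seg ['\n'] = -1 := by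
    intro seg hsub
    rw [PySem.Chars.find_eq_neg_one_iff]
    intro hin
    exact hno (hsub.mem (hin.sublist.mem (by simp)))
  have key : ∀ (u v : Nat), PySem.Chars.find (List.drop u (List.take v s)) ['\n'] = -1 :=
    fun u v => hseg _ ((List.drop_sublist _ _).trans (List.take_sublist _ _))
  unfold PySem.Chars.findFrom
  simp only [key, if_pos rfl]
  split_ifs <;> rfl

-- pvAdvance lands on the least index at or after j whose entry is ≥ pos
theorem pv_advance_spec (nls : List Int) (pos : Int) (hsort : nls.Pairwise (· ≤ ·)) :
    ∀ (d j : Nat), nls.length - j = d → j ≤ nls.length →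
      (∀ i, (hi : i < nls.length) → i < j → nls[i] < pos) →
      (pvAdvance nls pos j ≤ nls.length ∧
       (∀ i, (hi : i < nls.length) → i < pvAdvance nls pos j → nls[i] < pos) ∧
       (∀ i, (hi : i < nls.length) → pvAdvance nls pos j ≤ i → pos ≤ nls[i])) := by
  have hmono : ∀ (i j : Nat) (hi : i < nls.length) (hj : j < nls.length), i ≤ j →
      nls[i] ≤ nls[j] := by
    intro i j hi hj hij
    rcases Nat.eq_or_lt_of_le hij with rfl | hlt
    · exact le_refl _
    · exact List.pairwise_iff_getElem.mp hsort i j hi hj hlt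
  intro d
  induction d with
  | zero =>
    intro j hd hj hinv
    have hjl : j = nls.length := by omega
    rw [pvAdvance]
    rw [dif_neg (by omega)]
    exact ⟨hj, hinv, fun i hi hji => by omega⟩
  | succ d ih =>
    intro j hd hj hinv
    have hjl : j < nls.length := by omega
    rw [pvAdvance, dif_pos hjl]
    by_cases hlt : nls[j] < pos
    · rw [if_pos hlt]
      refine ih (j+1) (by omega) (by omega) ?_
      intro i hi hij
      rcases Nat.lt_or_ge i j with h | h
      · exact hinv i hi h
      · have : i = j := by omega
        subst this; exact hlt
    · rw [if_neg hlt]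
      refine ⟨by omega, hinv, ?_⟩
      intro i hi hji
      have := hmono j i hjl hi hji
      omega

theorem pv_floordiv_nonneg (ts : Int) (h : 0 ≤ ts) : 0 ≤ PySem.Int.floordiv ts 2 := by
  simp only [PySem.Int.floordiv]
  exact Int.fdiv_nonneg h (by omega)

theorem pv_floordiv_le (ts : Int) (h : 0 ≤ ts) : PySem.Int.floordiv ts 2 ≤ ts := by
  simp only [PySem.Int.floordiv]
  rw [Int.fdiv_eq_ediv_of_nonneg _ (by omega : (0:Int) ≤ 2)]
  omega

-- A's per-iteration rfind/find step computes the same candidate as B's cursor lookup,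
-- for any k with the 'least index ≥ pos' properties
theorem pv_step_eq (s : List Char) (lo pos : Int) (k : Nat) (h0 : 0 ≤ lo) (hlp : lo ≤ pos)
    (hpn : pos ≤ (s.length : Int))
    (hkle : k ≤ (pvNewlines s).length)
    (hbefore : ∀ i, (hi : i < (pvNewlines s).length) → i < k → (pvNewlines s)[i] < pos)
    (hafter : ∀ i, (hi : i < (pvNewlines s).length) → k ≤ i → pos ≤ (pvNewlines s)[i]) :
    (let np1 := PySem.Chars.rfindFrom s ['\n'] lo (some pos)
     if np1 = -1 then
       let np2 := PySem.Chars.findFrom s ['\n'] pos none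
       if np2 = -1 then (none : Option Int) else some np2
     else some np1)
    =
    (let nls := pvNewlines s
     if 0 < k ∧ lo ≤ nls.getD (k-1) 0 then some (nls.getD (k-1) 0)
     else if k < nls.length then some (nls.getD k 0)
     else none) := by
  simp only []
  set nls := pvNewlines s with hnls
  have hsort := pv_newlines_sorted s
  have hmono : ∀ (i j : Nat) (hi : i < nls.length) (hj : j < nls.length), i ≤ j →
      nls[i] ≤ nls[j] := by
    intro i j hi hj hij
    rcases Nat.eq_or_lt_of_le hij with rfl | hlt
    · exact le_refl _
    · exact List.pairwise_iff_getElem.mp hsort i j hi hj hlt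
  by_cases hcond : 0 < k ∧ lo ≤ nls.getD (k-1) 0
  · -- B takes the back-cursor branch; A's rfind finds the same newline
    obtain ⟨hkpos, hglo⟩ := hcond
    have hk1 : k - 1 < nls.length := by omega
    have hgD : nls.getD (k-1) 0 = nls[k-1] := List.getD_eq_getElem nls 0 hk1
    rw [hgD] at hglo
    have hgmem : nls[k-1] ∈ nls := List.getElem_mem hk1
    have hgpos : nls[k-1] < pos := hbefore (k-1) hk1 (by omega)
    rcases pv_rfindFrom_char s lo pos h0 hlp hpn with ⟨_, hnone⟩ | ⟨hmem, hRlo, hRpos, hmax⟩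
    · exact absurd ⟨hglo, hgpos⟩ (hnone nls[k-1] hgmem)
    · set R := PySem.Chars.rfindFrom s ['\n'] lo (some pos) with hR
      have hRg : R = nls[k-1] := by
        obtain ⟨j, hj, hjeq⟩ := (List.mem_iff_getElem (l := nls)).mp hmem
        have hjk : j < k := by
          by_contra hc
          have := hafter j hj (by omega)
          omega
        have hle1 : R ≤ nls[k-1] := hjeq ▸ hmono j (k-1) hj hk1 (by omega)
        have hle2 : nls[k-1] ≤ R := hmax nls[k-1] hgmem hglo hgpos
        omega
      have hRne : ¬ (R = -1) := by
        have := pv_nneg_mem s R hmem; omega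
      rw [if_neg hRne, if_pos ⟨hkpos, by rw [hgD]; exact hglo⟩, hgD, hRg]
  · -- no newline in [lo,pos): A's rfind returns -1
    have hnowin : ∀ i ∈ nls, ¬ (lo ≤ i ∧ i < pos) := by
      rintro i hi ⟨hi1, hi2⟩
      obtain ⟨j, hj, hjeq⟩ := (List.mem_iff_getElem (l := nls)).mp hi
      have hjk : j < k := by
        by_contra hc
        have := hafter j hj (by omega)
        omega
      have hkpos : 0 < k := by omega
      have hk1 : k - 1 < nls.length := by omega
      have hgD : nls.getD (k-1) 0 = nls[k-1] := List.getD_eq_getElem nls 0 hk1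
      have hglo : nls.getD (k-1) 0 < lo := by
        by_contra hc
        exact hcond ⟨hkpos, by omega⟩
      have hig : i ≤ nls[k-1] := hjeq ▸ hmono j (k-1) hj hk1 (by omega)
      omega
    have hrf : PySem.Chars.rfindFrom s ['\n'] lo (some pos) = -1 := by
      rcases pv_rfindFrom_char s lo pos h0 hlp hpn with ⟨h, _⟩ | ⟨hmem, hRlo, hRpos, _⟩
      · exact h
      · exact absurd ⟨hRlo, hRpos⟩ (hnowin _ hmem)
    rw [if_pos hrf, if_neg hcond]
    by_cases hklen : k < nls.length
    · -- forward: the least newline at or after pos is nls[k]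
      have hgD : nls.getD k 0 = nls[k] := List.getD_eq_getElem nls 0 hklen
      have hmmem : nls[k] ∈ nls := List.getElem_mem hklen
      have hmge : pos ≤ nls[k] := hafter k hklen (le_refl _)
      rcases pv_findFrom_char s pos (by omega) hpn with ⟨_, hnone⟩ | ⟨hmem, hFpos, hmin⟩
      · exact absurd hmge (hnone nls[k] hmmem)
      · set F := PySem.Chars.findFrom s ['\n'] pos none with hF
        have hFm : F = nls[k] := by
          obtain ⟨j, hj, hjeq⟩ := (List.mem_iff_getElem (l := nls)).mp hmem
          have hjk : k ≤ j := by
            by_contra hc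
            have := hbefore j hj (by omega)
            omega
          have hle1 : nls[k] ≤ F := hjeq ▸ hmono k j hklen hj hjk
          have hle2 : F ≤ nls[k] := hmin nls[k] hmmem hmge
          omega
        have hFne : ¬ (F = -1) := by
          have := pv_nneg_mem s F hmem; omega
        rw [if_neg hFne, if_pos hklen, hgD, hFm]
    · -- no newline at or after pos either: both break
      have hnofwd : ∀ i ∈ nls, ¬ pos ≤ i := by
        intro i hi hile
        obtain ⟨j, hj, hjeq⟩ := (List.mem_iff_getElem (l := nls)).mp hi
        have := hbefore j hj (by omega)
        omega
      rcases pv_findFrom_char s pos (by omega) hpn with ⟨h, _⟩ | ⟨hmem, hFpos, _⟩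
      · rw [if_pos h, if_neg hklen]
      · exact absurd hFpos (hnofwd _ hmem)

theorem pv_loops_eq_nonl (s : List Char) (ts : Int) (hno : '\n' ∉ s) :
    ∀ (fuel : Nat) (pos : Int) (splits : List Int),
      pvLoopA s ts fuel pos splits
        = pvLoopB (pvNewlines s) (s.length : Int) ts fuel pos 0 (splits.getLast?.getD 0) splits := by
  intro fuel pos splits
  cases fuel with
  | zero => rfl
  | succ f =>
    simp only [pvLoopA, pvLoopB]
    by_cases hlt : pos < (s.length : Int)
    · rw [if_pos hlt, if_pos hlt]
      rw [pv_newlines_nil s hno]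
      rw [pvAdvance]
      simp [pv_no_newline_rfindFrom s hno, pv_no_newline_findFrom s hno]
    · rw [if_neg hlt, if_neg hlt]

theorem pv_loops_eq (s : List Char) (ts : Int) (hts : 0 ≤ ts) :
    ∀ (fuel : Nat) (pos : Int) (j : Nat) (splits : List Int), 0 ≤ pos →
      j ≤ (pvNewlines s).length →
      (∀ i, (hi : i < (pvNewlines s).length) → i < j → (pvNewlines s)[i] < pos) →
      pvLoopA s ts fuel pos splits
        = pvLoopB (pvNewlines s) (s.length : Int) ts fuel pos j (splits.getLast?.getD 0) splits := by
  intro fuel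
  induction fuel with
  | zero => intro pos j splits _ _ _; rfl
  | succ f ih =>
    intro pos j splits hpos hjle hinv
    set nls := pvNewlines s with hnls
    by_cases hlt : pos < (s.length : Int)
    · have hfd0 := pv_floordiv_nonneg ts hts
      have hfdle := pv_floordiv_le ts hts
      set lo := max 0 (pos - PySem.Int.floordiv ts 2) with hlo
      have hlo0 : (0:Int) ≤ lo := le_max_left _ _
      have hlop : lo ≤ pos := max_le hpos (by omega)
      obtain ⟨hkle, hbefore, hafter⟩ :=
        pv_advance_spec nls pos (pv_newlines_sorted s) (nls.length - j) j rfl hjle hinv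
      set k := pvAdvance nls pos j with hk
      have hstep := pv_step_eq s lo pos k hlo0 hlop (le_of_lt hlt) hkle hbefore hafter
      simp only [pvLoopA, pvLoopB, if_pos hlt]
      simp only [] at hstep
      rw [hstep]
      -- case on B's candidate
      by_cases hback : 0 < k ∧ lo ≤ nls.getD (k-1) 0
      · rw [if_pos hback]
        dsimp only
        obtain ⟨hkpos, hglo⟩ := hback
        set nl := nls.getD (k-1) 0 with hnl
        have hpos' : pos < nl + 1 + ts := by
          have : pos - PySem.Int.floordiv ts 2 ≤ lo := le_max_right _ _
          omega
        have hinv' : ∀ i, (hi : i < nls.length) → i < k → nls[i] < nl + 1 + ts := by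
          intro i hi hik
          have := hbefore i hi hik
          omega
        by_cases hguard : splits.getLast?.getD 0 < nl + 1
        · rw [if_pos hguard, if_pos hguard]
          have := ih (nl + 1 + ts) k (splits ++ [nl+1]) (by omega) hkle hinv'
          simpa using this
        · rw [if_neg hguard, if_neg hguard]
          exact ih (nl + 1 + ts) k splits (by omega) hkle hinv'
      · rw [if_neg hback]
        by_cases hfwd : k < nls.length
        · rw [if_pos hfwd]
          dsimp only
          set nl := nls.getD k 0 with hnl
          have hgD : nl = nls[k] := List.getD_eq_getElem nls 0 hfwd
          have hnlge : pos ≤ nl := hgD ▸ hafter k hfwd (le_refl _)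
          have hpos' : pos < nl + 1 + ts := by omega
          have hinv' : ∀ i, (hi : i < nls.length) → i < k → nls[i] < nl + 1 + ts := by
            intro i hi hik
            have := hbefore i hi hik
            omega
          by_cases hguard : splits.getLast?.getD 0 < nl + 1
          · rw [if_pos hguard, if_pos hguard]
            have := ih (nl + 1 + ts) k (splits ++ [nl+1]) (by omega) hkle hinv'
            simpa using this
          · rw [if_neg hguard, if_neg hguard]
            exact ih (nl + 1 + ts) k splits (by omega) hkle hinv'
        · rw [if_neg hfwd]
    · simp only [pvLoopA, pvLoopB, if_neg hlt]

-- ===== VERDICT (by name: the statement is the Claim_ definition above) =====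
theorem find_safe_splits_py_spec : Claim_equal_find_safe_splits_py := by
  intro code ts _ hpre
  unfold Spec_find_safe_splits_py find_safe_splits_py find_safe_splits_py_alt
  rcases hpre with hts | hno
  · have := pv_loops_eq code.toList ts hts (code.toList.length + 1) ts 0 [] hts
      (by omega) (by intro i hi h; omega)
    simpa using this
  · have := pv_loops_eq_nonl code.toList ts hno (code.toList.length + 1) ts []
    simpa using this
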